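-- pv_equiv track=rewrite | github.com/R-MustafaHafeez/chatbot_sql_final | src/agents/chitchat_agent.py | is_casual_query
-- ===== SOURCE A (Python) =====
-- def is_casual_query(query: str) -> bool:
--     """Check if query is casual conversation."""
--     casual_patterns = [
--         "hello", "hi", "hey", "good morning", "good afternoon", "good evening",
--         "how are you", "what's up", "thanks", "thank you", "bye", "goodbye",
--         "nice to meet you", "how's it going", "what's new", "help", "joke",
--         "tell me a story", "what's the weather", "how's your day"
--     ]
--
--     query_lower = query.lower()
--     return any(pattern in query_lower for pattern in casual_patterns)
-- ===== SOURCE B (Python) =====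
-- # First-character index: at each position, only patterns whose first letter matches are tried.
-- CASUAL_INDEX = {
--     'h': ("ello", "i", "ey", "ow are you", "ow's it going", "ow's your day", "elp"),
--     'g': ("ood morning", "ood afternoon", "ood evening", "oodbye"),
--     'w': ("hat's up", "hat's new", "hat's the weather"),
--     't': ("hanks", "hank you", "ell me a story"),
--     'b': ("ye",),
--     'n': ("ice to meet you",),
--     'j': ("oke",),
-- }
--
-- def is_casual_query(query: str) -> bool:
--     """Check if query is casual conversation (positional scan with a first-char index)."""
--     q = query.lower()
--     for i, c in enumerate(q):
--         for tail in CASUAL_INDEX.get(c, ()):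
--             if q.startswith(tail, i + 1):
--                 return True
--     return False
-- ===== Notes on version B (the rewrite author's own statement) =====
-- stated objective: alternative
-- what changed: Replaced A's per-pattern whole-string substring loop by a single positional scan over the lowercased query that, at each position, consults a precomputed first-character index (dict from first letter to pattern tails) and only tests the few patterns that can start there.
import Mathlib
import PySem

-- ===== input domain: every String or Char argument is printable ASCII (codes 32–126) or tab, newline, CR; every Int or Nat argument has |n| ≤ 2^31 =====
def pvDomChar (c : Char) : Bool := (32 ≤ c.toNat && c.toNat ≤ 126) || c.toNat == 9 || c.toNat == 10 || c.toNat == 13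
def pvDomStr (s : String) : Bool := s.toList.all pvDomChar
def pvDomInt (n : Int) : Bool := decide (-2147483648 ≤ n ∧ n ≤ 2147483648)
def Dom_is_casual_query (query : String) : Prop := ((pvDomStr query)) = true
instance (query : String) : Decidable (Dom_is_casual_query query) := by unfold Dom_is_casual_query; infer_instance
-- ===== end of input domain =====

-- B replaces A's per-pattern whole-string substring loop by one positional scan over the
-- lowercased query driven by a first-character index (dict: first letter -> pattern tails);
-- alternative, similar cost.


-- ===== PORT A =====
-- A's literal pattern list
def casualPatterns : List String :=
  ["hello", "hi", "hey", "good morning", "good afternoon", "good evening",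
   "how are you", "what's up", "thanks", "thank you", "bye", "goodbye",
   "nice to meet you", "how's it going", "what's new", "help", "joke",
   "tell me a story", "what's the weather", "how's your day"]

def is_casual_query (query : String) : Bool :=
  let query_lower := PySem.Str.lower query
  casualPatterns.any (fun pattern => PySem.Str.isIn pattern query_lower)

-- ===== PORT B =====
-- B's module-level dict literal CASUAL_INDEX (distinct keys): first letter ↦ pattern tails
def casualIndex : PySem.Dict Char (List String) :=
  PySem.Dict.mk
    [('h', ["ello", "i", "ey", "ow are you", "ow's it going", "ow's your day", "elp"]),
     ('g', ["ood morning", "ood afternoon", "ood evening", "oodbye"]),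
     ('w', ["hat's up", "hat's new", "hat's the weather"]),
     ('t', ["hanks", "hank you", "ell me a story"]),
     ('b', ["ye"]),
     ('n', ["ice to meet you"]),
     ('j', ["oke"])]

-- the enumerate loop: at entry (i, c), q.startswith(tail, i+1) tests tail against the suffix
-- after c, so the scan is structural recursion on the suffixes of q
def casualIndexScan : List Char → Bool
  | [] => false
  | c :: rest =>
      ((casualIndex.getD c []).any (fun tail => PySem.Chars.startswith rest tail.toList))
      || casualIndexScan rest

def is_casual_query_alt (query : String) : Bool :=
  casualIndexScan (PySem.Str.lower query).toList

-- ===== PRECONDITION & SPEC =====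
def Spec_is_casual_query (query : String) (out : Bool) : Prop := out = is_casual_query_alt query
instance (query : String) (out : Bool) : Decidable (Spec_is_casual_query query out) := by unfold Spec_is_casual_query; infer_instance

-- ===== CLAIM (what is proved, stated in full; the proofs are below) =====
def Claim_equal_is_casual_query : Prop := ∀ (query : String), Dom_is_casual_query query → Spec_is_casual_query query (is_casual_query query)

-- ===== LEMMAS AND PROOFS =====

-- at one position, consulting the first-char index is the same as testing every full pattern
-- as a prefix of the current suffix
lemma casualIndex_step (c : Char) (rest : List Char) :
    ((casualIndex.getD c []).any (fun tail => PySem.Chars.startswith rest tail.toList)) = true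
      ↔ ∃ p ∈ casualPatterns, p.toList <+: (c :: rest) := by
  by_cases hh : c = 'h'
  · subst hh
    have hd : casualIndex.getD 'h' [] =
        ["ello", "i", "ey", "ow are you", "ow's it going", "ow's your day", "elp"] := by decide
    simp [hd, casualPatterns, PySem.Chars.startswith_iff, List.cons_prefix_cons]
    tauto
  by_cases hg : c = 'g'
  · subst hg
    have hd : casualIndex.getD 'g' [] =
        ["ood morning", "ood afternoon", "ood evening", "oodbye"] := by decide
    simp [hd, casualPatterns, PySem.Chars.startswith_iff, List.cons_prefix_cons]
  by_cases hw : c = 'w'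
  · subst hw
    have hd : casualIndex.getD 'w' [] =
        ["hat's up", "hat's new", "hat's the weather"] := by decide
    simp [hd, casualPatterns, PySem.Chars.startswith_iff, List.cons_prefix_cons]
  by_cases ht : c = 't'
  · subst ht
    have hd : casualIndex.getD 't' [] = ["hanks", "hank you", "ell me a story"] := by decide
    simp [hd, casualPatterns, PySem.Chars.startswith_iff, List.cons_prefix_cons]
  by_cases hb : c = 'b'
  · subst hb
    have hd : casualIndex.getD 'b' [] = ["ye"] := by decide
    simp [hd, casualPatterns, PySem.Chars.startswith_iff, List.cons_prefix_cons]
  by_cases hn : c = 'n'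
  · subst hn
    have hd : casualIndex.getD 'n' [] = ["ice to meet you"] := by decide
    simp [hd, casualPatterns, PySem.Chars.startswith_iff, List.cons_prefix_cons]
  by_cases hj : c = 'j'
  · subst hj
    have hd : casualIndex.getD 'j' [] = ["oke"] := by decide
    simp [hd, casualPatterns, PySem.Chars.startswith_iff, List.cons_prefix_cons]
  · have hd : casualIndex.getD c [] = [] := by
      simp [casualIndex, PySem.Dict.getD, PySem.Dict.get?, beq_iff_eq,
        Ne.symm hh, Ne.symm hg, Ne.symm hw, Ne.symm ht, Ne.symm hb, Ne.symm hn, Ne.symm hj]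
    simp [hd, casualPatterns, List.cons_prefix_cons,
      Ne.symm hh, Ne.symm hg, Ne.symm hw, Ne.symm ht, Ne.symm hb, Ne.symm hn, Ne.symm hj]

lemma casualIndexScan_iff (L : List Char) :
    casualIndexScan L = true ↔ ∃ p ∈ casualPatterns, p.toList <:+: L := by
  induction L with
  | nil =>
      simp only [casualIndexScan, List.infix_nil]
      constructor
      · intro h; cases h
      · rintro ⟨p, hp, h⟩
        fin_cases hp <;> simp_all
  | cons c rest ih =>
      simp only [casualIndexScan, Bool.or_eq_true, ih, List.infix_cons_iff, casualIndex_step]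
      constructor
      · rintro (⟨p, hp, h⟩ | ⟨p, hp, h⟩)
        · exact ⟨p, hp, Or.inl h⟩
        · exact ⟨p, hp, Or.inr h⟩
      · rintro ⟨p, hp, h | h⟩
        · exact Or.inl ⟨p, hp, h⟩
        · exact Or.inr ⟨p, hp, h⟩

-- ===== VERDICT (by name: the statement is the Claim_ definition above) =====
theorem is_casual_query_spec : Claim_equal_is_casual_query := by
  intro query _
  show is_casual_query query = is_casual_query_alt query
  have h : is_casual_query query = true ↔ is_casual_query_alt query = true := by
    simp only [is_casual_query, is_casual_query_alt, casualIndexScan_iff, List.any_eq_true,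
      PySem.Str.isIn_iff_infix]
  cases hA : is_casual_query query <;> cases hB : is_casual_query_alt query <;> simp_all
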